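-- pv_equiv track=rewrite | github.com/cpotter302/aliasrc-shell | python/clean_setup.py | slice_line
-- ===== SOURCE A (Python) =====
-- def slice_line(text, char, occur):
--     string = ""
--     counter = 0
--     for c in range(len(text)):
--         if counter != occur:
--             string += text[c]
--             if text[c] == char:
--                 counter = counter + 1
--     return string.strip()
-- ===== SOURCE B (Python) =====
-- def slice_line(text, char, occur):
--     if occur == 0:
--         return ""
--     if occur > 0:
--         cnt = 0
--         for i, c in enumerate(text):
--             if c == char:
--                 cnt += 1
--                 if cnt == occur:
--                     return text[:i + 1].strip()
--     return text.strip()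
-- ===== Notes on version B (the rewrite author's own statement) =====
-- stated objective: simpler
-- what changed: B computes the cut position with an early-exit scan and slices the text once, instead of A's copying every character through an accumulator gated on a running counter.
import Mathlib
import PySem

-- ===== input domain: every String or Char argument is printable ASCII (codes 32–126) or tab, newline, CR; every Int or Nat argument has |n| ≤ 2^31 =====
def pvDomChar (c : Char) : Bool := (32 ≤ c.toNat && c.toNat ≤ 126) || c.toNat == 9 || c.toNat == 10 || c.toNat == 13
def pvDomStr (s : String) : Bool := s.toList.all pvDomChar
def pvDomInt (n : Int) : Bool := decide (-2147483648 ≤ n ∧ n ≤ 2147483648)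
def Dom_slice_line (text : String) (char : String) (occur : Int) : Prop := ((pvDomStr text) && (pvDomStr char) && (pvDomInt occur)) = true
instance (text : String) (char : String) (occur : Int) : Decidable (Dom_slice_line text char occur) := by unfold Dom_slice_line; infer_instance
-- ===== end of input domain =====

-- B computes the cut position first and slices once, instead of copying characters
-- through a gated accumulator (objective: simpler).

-- ===== PORT A =====
-- one loop step of A: append the char, bump the counter on a match, all gated on counter != occur
def stepA (char : String) (occur : Int) (st : List Char × Int) (c : Char) : List Char × Int :=
  if st.2 ≠ occur then
    (st.1 ++ [c], if String.ofList [c] = char then st.2 + 1 else st.2)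
  else st

def slice_line (text : String) (char : String) (occur : Int) : String :=
  PySem.Str.strip (String.ofList (text.toList.foldl (stepA char occur) ([], 0)).1)

-- ===== PORT B =====
-- Source B's scan: index (relative to the current suffix) of the occur-th match, none if absent
def sliceScan (char : String) (occur : Int) : List Char → Int → Option Nat
  | [], _ => none
  | c :: rest, cnt =>
      if String.ofList [c] = char then
        if cnt + 1 = occur then some 0
        else (sliceScan char occur rest (cnt + 1)).map (· + 1)
      else (sliceScan char occur rest cnt).map (· + 1)

def slice_line_alt (text : String) (char : String) (occur : Int) : String :=
  if occur = 0 then ""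
  else if 0 < occur then
    match sliceScan char occur text.toList 0 with
    | some i => PySem.Str.strip (String.ofList (text.toList.take (i + 1)))
    | none => PySem.Str.strip text
  else PySem.Str.strip text

-- ===== PRECONDITION & SPEC =====
def Spec_slice_line (text : String) (char : String) (occur : Int) (out : String) : Prop := out = slice_line_alt text char occur
instance (text : String) (char : String) (occur : Int) (out : String) : Decidable (Spec_slice_line text char occur out) := by unfold Spec_slice_line; infer_instance

-- ===== CLAIM (what is proved, stated in full; the proofs are below) =====
def Claim_equal_slice_line : Prop := ∀ (text : String) (char : String) (occur : Int), Dom_slice_line text char occur → Spec_slice_line text char occur (slice_line text char occur)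

-- ===== LEMMAS AND PROOFS =====

-- once the counter hits occur, A's fold never changes the state again
lemma foldl_stepA_stuck (char : String) (occur : Int) :
    ∀ (l : List Char) (acc : List Char),
      l.foldl (stepA char occur) (acc, occur) = (acc, occur) := by
  intro l
  induction l with
  | nil => intro acc; rfl
  | cons c rest ih =>
      intro acc
      simp only [List.foldl_cons, stepA, ne_eq, not_true_eq_false, if_false]
      exact ih acc

-- with a negative target the gate is always open: A copies the whole list
lemma foldl_stepA_neg (char : String) (occur : Int) (hocc : occur < 0) :
    ∀ (l : List Char) (acc : List Char) (cnt : Int), 0 ≤ cnt →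
      (l.foldl (stepA char occur) (acc, cnt)).1 = acc ++ l := by
  intro l
  induction l with
  | nil => intro acc cnt _; simp
  | cons c rest ih =>
      intro acc cnt hcnt
      have hne : cnt ≠ occur := by omega
      simp only [List.foldl_cons, stepA, hne, ne_eq, not_false_eq_true, if_true]
      by_cases hc : String.ofList [c] = char
      · simp only [hc, ite_true]
        rw [ih (acc ++ [c]) (cnt + 1) (by omega)]
        simp
      · simp only [if_neg hc]
        rw [ih (acc ++ [c]) cnt hcnt]
        simp

-- with a positive target still ahead, A's accumulated chars are exactly the slice B takes
lemma foldl_stepA_pos (char : String) (occur : Int) :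
    ∀ (l : List Char) (acc : List Char) (cnt : Int), 0 ≤ cnt → cnt < occur →
      (l.foldl (stepA char occur) (acc, cnt)).1 =
        acc ++ (match sliceScan char occur l cnt with
                | some i => l.take (i + 1)
                | none => l) := by
  intro l
  induction l with
  | nil => intro acc cnt _ _; simp [sliceScan]
  | cons c rest ih =>
      intro acc cnt hcnt hlt
      have hne : cnt ≠ occur := by omega
      simp only [List.foldl_cons, stepA, hne, ne_eq, not_false_eq_true, if_true]
      by_cases hc : String.ofList [c] = char
      · simp only [hc, ite_true]
        by_cases hhit : cnt + 1 = occur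
        · rw [hhit, foldl_stepA_stuck]
          simp [sliceScan, hc, hhit]
        · rw [ih (acc ++ [c]) (cnt + 1) (by omega) (by omega)]
          simp only [sliceScan, hc, ite_true, if_neg hhit]
          cases h : sliceScan char occur rest (cnt + 1) with
          | none => simp
          | some i => simp [List.take_succ_cons]
      · simp only [if_neg hc]
        rw [ih (acc ++ [c]) cnt hcnt hlt]
        simp only [sliceScan, if_neg hc]
        cases h : sliceScan char occur rest cnt with
        | none => simp
        | some i => simp [List.take_succ_cons]

-- ===== VERDICT (by name: the statement is the Claim_ definition above) =====
theorem slice_line_spec : Claim_equal_slice_line := by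
  intro text char occur _
  unfold Spec_slice_line slice_line slice_line_alt
  by_cases h0 : occur = 0
  · subst h0
    rw [foldl_stepA_stuck]
    simp [PySem.Str.strip, PySem.Chars.strip, PySem.Chars.lstrip, PySem.Chars.rstrip]
  · by_cases hpos : 0 < occur
    · simp only [if_neg h0, if_pos hpos]
      rw [foldl_stepA_pos char occur text.toList [] 0 le_rfl hpos]
      cases h : sliceScan char occur text.toList 0 with
      | none => simp [PySem.Str.strip]
      | some i => simp
    · have hneg : occur < 0 := by omega
      simp only [if_neg h0, if_neg hpos]
      rw [foldl_stepA_neg char occur hneg text.toList [] 0 le_rfl]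
      simp [PySem.Str.strip]
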